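-- pv_equiv track=rewrite | github.com/volcengine/verl | atropos/environments/intern_bootcamp/internbootcamp_lib/internbootcamp/bootcamp/cvasyaandbeautifularrays/cvasyaandbeautifularrays.py | compute_max_beauty
-- ===== SOURCE A (Python) =====
-- def compute_max_beauty(n, k, a):
--     a_sorted = sorted(a)
--     current_gcd = a_sorted[0]
--
--     while True:
--         update_flag = False
--         for num in a_sorted:
--             residue = num % current_gcd
--             if residue > k:
--                 # 计算可能的新候选GCD
--                 new_quotient = (num // current_gcd) + 1
--                 candidate_gcd = num // new_quotient
--
--                 # 确保候选GCD不小于1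
--                 current_gcd = max(1, candidate_gcd)
--                 update_flag = True
--                 break
--
--         if not update_flag:
--             break
--
--     # 最终验证所有元素符合条件
--     for num in a_sorted:
--         if num % current_gcd > k:
--             return 1  # 安全回退
--
--     return current_gcd
-- ===== SOURCE B (Python) =====
-- def compute_max_beauty(n, k, a):
--     # Fixed-point descent: one full pass per round computes, for every element
--     # violating g, the largest gcd candidate below g; jump straight to the
--     # smallest such candidate. No sorting, no restart-on-first-violation.
--     g = min(a)
--     while True:
--         cands = [num // (num // g + 1) for num in a if num % g > k]
--         if not cands:
--             return g
--         g = min(cands)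
-- ===== Notes on version B (the rewrite author's own statement) =====
-- stated objective: alternative
-- what changed: B drops the sort and the restart-on-first-violation scan: each round is one full pass collecting, for every element whose residue exceeds k, its next gcd candidate, and jumps directly to the minimum of those candidates (largest safe drop), iterating to a fixed point.
import Mathlib
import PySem

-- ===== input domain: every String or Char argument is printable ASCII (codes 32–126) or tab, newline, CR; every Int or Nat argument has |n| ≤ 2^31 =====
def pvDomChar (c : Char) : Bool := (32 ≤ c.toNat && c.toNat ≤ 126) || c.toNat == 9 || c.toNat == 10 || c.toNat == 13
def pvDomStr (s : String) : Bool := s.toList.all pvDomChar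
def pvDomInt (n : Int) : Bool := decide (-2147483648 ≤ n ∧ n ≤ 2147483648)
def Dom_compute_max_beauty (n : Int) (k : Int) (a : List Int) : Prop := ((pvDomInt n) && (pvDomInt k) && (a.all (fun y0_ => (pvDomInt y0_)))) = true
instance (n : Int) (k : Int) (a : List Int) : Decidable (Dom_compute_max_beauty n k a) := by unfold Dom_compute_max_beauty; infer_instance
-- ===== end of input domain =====

-- ===== PORT A =====
-- B is an alternative algorithm: instead of sorting and restarting the scan at the first
-- violating element, each round makes one full pass collecting every violating element's
-- next gcd candidate and jumps to the minimum of those candidates; same result, no sort.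

-- first num in xs with num % g > k (A's for-loop with break), none = no violation
def pvFailA (k g : Int) : List Int -> Option Int
  | [] => none
  | x :: xs => if k < PySem.Int.mod x g then some x else pvFailA k g xs

-- A's 'while True' loop; fuel makes the recursion total (Python diverges only outside Pre_)
def pvLoopA (k : Int) (xs : List Int) : Nat -> Int -> Int
  | 0, g => g
  | fuel + 1, g =>
    match pvFailA k g xs with
    | none => g
    | some num =>
        pvLoopA k xs fuel
          (max 1 (PySem.Int.floordiv num (PySem.Int.floordiv num g + 1)))

def compute_max_beauty (n : Int) (k : Int) (a : List Int) : Int :=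
  let s := PySem.List.sorted a (fun x => x)
  match PySem.List.pyGet? s 0 with
  | none => 0  -- a = []: Python raises IndexError here; excluded by Pre_
  | some g0 =>
      let g := pvLoopA k s (g0.toNat + 2) g0
      match pvFailA k g s with  -- final verification loop
      | some _ => 1
      | none => g

-- ===== PORT B =====
-- B's 'while True' loop: one full pass builds the candidate list, jump to its minimum
def pvLoopB (k : Int) (xs : List Int) : Nat -> Int -> Int
  | 0, g => g
  | fuel + 1, g =>
    let cands := (xs.filter (fun num => decide (k < PySem.Int.mod num g))).map
        (fun num => PySem.Int.floordiv num (PySem.Int.floordiv num g + 1))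
    match PySem.List.min? cands (fun x => x) with
    | none => g
    | some m => pvLoopB k xs fuel m

def compute_max_beauty_alt (n : Int) (k : Int) (a : List Int) : Int :=
  match PySem.List.min? a (fun x => x) with
  | none => 0  -- a = []: Python's min([]) raises ValueError; excluded by Pre_
  | some g0 => pvLoopB k a (g0.toNat + 2) g0

-- ===== PRECONDITION & SPEC =====
-- Pre_ excludes exactly the inputs where Python A does not return: a = [] (IndexError),
-- k < 0 (the while loop never terminates or divides by zero), and min(a) = 0 (ZeroDivisionError).
def Pre_compute_max_beauty (n : Int) (k : Int) (a : List Int) : Prop :=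
  a ≠ [] ∧ 0 ≤ k ∧ ((0 : Int) ∈ a → ∃ x ∈ a, x < 0)
instance (n : Int) (k : Int) (a : List Int) : Decidable (Pre_compute_max_beauty n k a) := by
  unfold Pre_compute_max_beauty; infer_instance

def pvWitness_compute_max_beauty : Int × Int × List Int := (3, 1, [7, 5, 10])

def Spec_compute_max_beauty (n : Int) (k : Int) (a : List Int) (out : Int) : Prop := out = compute_max_beauty_alt n k a
instance (n : Int) (k : Int) (a : List Int) (out : Int) : Decidable (Spec_compute_max_beauty n k a out) := by unfold Spec_compute_max_beauty; infer_instance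

-- ===== CLAIM (what is proved, stated in full; the proofs are below) =====
def Claim_equal_compute_max_beauty : Prop := ∀ (n : Int) (k : Int) (a : List Int), Dom_compute_max_beauty n k a → Pre_compute_max_beauty n k a → Spec_compute_max_beauty n k a (compute_max_beauty n k a)

-- ===== LEMMAS AND PROOFS =====

-- g is the answer: 1 ≤ g ≤ m, every element's residue mod g is ≤ k, and every g' in (g, m] fails
def pvGood (k m g : Int) (xs : List Int) : Prop :=
  1 ≤ g ∧ g ≤ m ∧ (∀ x ∈ xs, PySem.Int.mod x g ≤ k) ∧
    (∀ g', g < g' → g' ≤ m → ∃ x ∈ xs, k < PySem.Int.mod x g')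

theorem pvGood_unique {k m g1 g2 : Int} {xs : List Int}
    (h1 : pvGood k m g1 xs) (h2 : pvGood k m g2 xs) : g1 = g2 := by
  obtain ⟨h11, h12, h13, h14⟩ := h1
  obtain ⟨h21, h22, h23, h24⟩ := h2
  rcases lt_trichotomy g1 g2 with h | h | h
  · obtain ⟨x, hx, hk⟩ := h14 g2 h h22
    exact absurd (h23 x hx) (not_le.mpr hk)
  · exact h
  · obtain ⟨x, hx, hk⟩ := h24 g1 h h12
    exact absurd (h13 x hx) (not_le.mpr hk)

-- the skip lemma: every g' in (num//(num//g+1), g] still violates: num % g' ≥ num % g > k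
theorem pv_skip {x g g' k : Int} (hg : 0 < g) (hgx : g ≤ x) (hk : 0 ≤ k)
    (hfail : k < PySem.Int.mod x g)
    (hlo : PySem.Int.floordiv x (PySem.Int.floordiv x g + 1) < g') (hhi : g' ≤ g) :
    k < PySem.Int.mod x g' := by
  set q := PySem.Int.floordiv x g with hq
  have hq1 : 1 ≤ q := (PySem.Int.le_floordiv_iff_mul_le hg).mpr (by linarith)
  have hqpos : (0:Int) < q + 1 := by linarith
  have hcand0 : (0:Int) ≤ PySem.Int.floordiv x (q + 1) :=
    (PySem.Int.le_floordiv_iff_mul_le hqpos).mpr (by linarith)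
  have hg' : 0 < g' := by omega
  have hxlt : x < g' * (q + 1) := (PySem.Int.floordiv_lt_iff_lt_mul hqpos).mp hlo
  have hqg : q * g ≤ x := (PySem.Int.le_floordiv_iff_mul_le hg).mp (le_refl q)
  have hqg' : q * g' ≤ x := by nlinarith
  have hq' : PySem.Int.floordiv x g' = q :=
    (PySem.Int.floordiv_eq_iff_of_pos hg').mpr ⟨hqg', by linarith⟩
  have e1 := PySem.Int.floordiv_mul_add_mod x g
  have e2 := PySem.Int.floordiv_mul_add_mod x g'
  rw [hq'] at e2
  rw [← hq] at e1
  nlinarith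

-- the drop lemma: if num violates g then the candidate num//(num//g+1) is in [1, g)
theorem pv_drop {x g k : Int} (hg : 0 < g) (hgx : g ≤ x) (hk : 0 ≤ k)
    (hfail : k < PySem.Int.mod x g) :
    1 ≤ PySem.Int.floordiv x (PySem.Int.floordiv x g + 1) ∧
      PySem.Int.floordiv x (PySem.Int.floordiv x g + 1) < g := by
  set q := PySem.Int.floordiv x g with hq
  have hq1 : 1 ≤ q := (PySem.Int.le_floordiv_iff_mul_le hg).mpr (by linarith)
  have hqpos : (0:Int) < q + 1 := by linarith
  have hg2 : 2 ≤ g := by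
    by_contra h
    have hg1 : g = 1 := by omega
    have h1 := PySem.Int.mod_lt x hg
    have h2 := PySem.Int.mod_nonneg x hg
    omega
  have e1 := PySem.Int.floordiv_mul_add_mod x g
  rw [← hq] at e1
  have hmlt := PySem.Int.mod_lt x hg
  have hmnn := PySem.Int.mod_nonneg x hg
  constructor
  · exact (PySem.Int.le_floordiv_iff_mul_le hqpos).mpr (by nlinarith)
  · exact (PySem.Int.floordiv_lt_iff_lt_mul hqpos).mpr (by nlinarith)

theorem pvFailA_none_iff (k g : Int) (xs : List Int) :
    pvFailA k g xs = none ↔ ∀ x ∈ xs, PySem.Int.mod x g ≤ k := by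
  induction xs with
  | nil => simp [pvFailA]
  | cons x xs ih =>
    simp only [pvFailA]
    split_ifs with h
    · simp only [false_iff, not_forall]
      exact ⟨x, List.mem_cons_self, by omega⟩
    · rw [ih]
      constructor
      · intro hall y hy
        rcases List.mem_cons.mp hy with rfl | hy'
        · omega
        · exact hall y hy'
      · intro hall y hy
        exact hall y (List.mem_cons_of_mem _ hy)

theorem pvFailA_some {k g x : Int} {xs : List Int} (h : pvFailA k g xs = some x) :
    x ∈ xs ∧ k < PySem.Int.mod x g := by
  induction xs with
  | nil => simp [pvFailA] at h
  | cons y ys ih =>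
    simp only [pvFailA] at h
    split_ifs at h with hy
    · cases h; exact ⟨List.mem_cons_self, hy⟩
    · obtain ⟨h1, h2⟩ := ih h
      exact ⟨List.mem_cons_of_mem _ h1, h2⟩

-- A's loop lands on the unique pvGood value
theorem pvLoopA_good {k m : Int} {xs : List Int} (hk : 0 ≤ k)
    (hmin : ∀ x ∈ xs, m ≤ x) :
    ∀ (fuel : Nat) (g : Int), 1 ≤ g → g ≤ m →
      (∀ g', g < g' → g' ≤ m → ∃ x ∈ xs, k < PySem.Int.mod x g') →
      g.toNat < fuel → pvGood k m (pvLoopA k xs fuel g) xs := by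
  intro fuel
  induction fuel with
  | zero => intro g _ _ _ hf; omega
  | succ fuel ih =>
    intro g hg1 hgm hP hf
    cases hfa : pvFailA k g xs with
    | none =>
      simp only [pvLoopA, hfa]
      exact ⟨hg1, hgm, (pvFailA_none_iff k g xs).mp hfa, hP⟩
    | some x =>
      simp only [pvLoopA, hfa]
      obtain ⟨hx, hfail⟩ := pvFailA_some hfa
      have hgx : g ≤ x := le_trans hgm (hmin x hx)
      have hg0 : 0 < g := by omega
      obtain ⟨hc1, hc2⟩ := pv_drop hg0 hgx hk hfail
      have hmax : max 1 (PySem.Int.floordiv x (PySem.Int.floordiv x g + 1))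
          = PySem.Int.floordiv x (PySem.Int.floordiv x g + 1) := max_eq_right hc1
      rw [hmax]
      apply ih _ hc1 (by omega)
      · intro g' hg'1 hg'2
        by_cases hle : g' ≤ g
        · exact ⟨x, hx, pv_skip hg0 hgx hk hfail hg'1 hle⟩
        · exact hP g' (by omega) hg'2
      · omega

-- B's loop lands on the unique pvGood value
theorem pvLoopB_good {k m : Int} {xs : List Int} (hk : 0 ≤ k)
    (hmin : ∀ x ∈ xs, m ≤ x) :
    ∀ (fuel : Nat) (g : Int), 1 ≤ g → g ≤ m →
      (∀ g', g < g' → g' ≤ m → ∃ x ∈ xs, k < PySem.Int.mod x g') →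
      g.toNat < fuel → pvGood k m (pvLoopB k xs fuel g) xs := by
  intro fuel
  induction fuel with
  | zero => intro g _ _ _ hf; omega
  | succ fuel ih =>
    intro g hg1 hgm hP hf
    cases hmn : PySem.List.min?
        ((xs.filter (fun num => decide (k < PySem.Int.mod num g))).map
          (fun num => PySem.Int.floordiv num (PySem.Int.floordiv num g + 1)))
        (fun x => x) with
    | none =>
      simp only [pvLoopB, hmn]
      refine ⟨hg1, hgm, ?_, hP⟩
      rw [PySem.List.min?_eq_none_iff, List.map_eq_nil_iff, List.filter_eq_nil_iff] at hmn
      intro x hx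
      have := hmn x hx
      simp only [decide_eq_true_eq] at this
      omega
    | some c =>
      simp only [pvLoopB, hmn]
      have hcmem := PySem.List.min?_mem hmn
      simp only [List.mem_map, List.mem_filter] at hcmem
      obtain ⟨x, ⟨hx, hfx⟩, hxc⟩ := hcmem
      have hfail : k < PySem.Int.mod x g := by simpa using hfx
      have hgx : g ≤ x := le_trans hgm (hmin x hx)
      have hg0 : 0 < g := by omega
      obtain ⟨hc1, hc2⟩ := pv_drop hg0 hgx hk hfail
      rw [hxc] at hc1 hc2
      apply ih c hc1 (by omega)
      · intro g' hg'1 hg'2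
        by_cases hle : g' ≤ g
        · refine ⟨x, hx, pv_skip hg0 hgx hk hfail ?_ hle⟩
          omega
        · exact hP g' (by omega) hg'2
      · omega

-- ===== VERDICT (by name: the statement is the Claim_ definition above) =====
theorem compute_max_beauty_spec : Claim_equal_compute_max_beauty := by
  intro n k a _hdom hpre
  obtain ⟨hne, hk, hzero⟩ := hpre
  unfold Spec_compute_max_beauty compute_max_beauty compute_max_beauty_alt
  cases hs : PySem.List.sorted a (fun x => x) with
  | nil => exact absurd ((PySem.List.sorted_eq_nil_iff a _ _).mp hs) hne
  | cons m t =>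
    have hmem : ∀ x, x ∈ m :: t ↔ x ∈ a := by
      intro x; rw [← hs]; exact PySem.List.mem_sorted a _ _ x
    have hmin : ∀ x ∈ a, m ≤ x := PySem.List.key_head_sorted_le a (fun x => x) hs
    have hma : m ∈ a := (hmem m).mp List.mem_cons_self
    cases hmn : PySem.List.min? a (fun x => x) with
    | none => exact absurd ((PySem.List.min?_eq_none_iff a _).mp hmn) hne
    | some m' =>
      have hm'a := PySem.List.min?_mem hmn
      have hm'min := PySem.List.min?_isMin hmn
      have hmm' : m' = m := le_antisymm (hm'min m hma) (hmin m' hm'a)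
      rw [hmm'] at hmn
      rw [hmm']
      simp only [PySem.List.pyGet?, PySem.List.pyIdx?]
      norm_num
      have hminS : ∀ x ∈ m :: t, m ≤ x := fun x hx => hmin x ((hmem x).mp hx)
      by_cases hm1 : 1 ≤ m
      · -- positive case: both loops reach the unique pvGood value
        have hA := pvLoopA_good (xs := m :: t) (m := m) hk hminS
          (m.toNat + 2) m hm1 le_rfl (by intro g' h1 h2; omega) (by omega)
        have hB := pvLoopB_good (xs := a) (m := m) hk hmin
          (m.toNat + 2) m hm1 le_rfl (by intro g' h1 h2; omega) (by omega)
        have hA' : pvGood k m (pvLoopA k (m :: t) (m.toNat + 2) m) a := by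
          obtain ⟨a1, a2, a3, a4⟩ := hA
          refine ⟨a1, a2, fun x hx => a3 x ((hmem x).mpr hx), fun g' h1 h2 => ?_⟩
          obtain ⟨x, hx, hxk⟩ := a4 g' h1 h2
          exact ⟨x, (hmem x).mp hx, hxk⟩
        have hver : pvFailA k (pvLoopA k (m :: t) (m.toNat + 2) m) (m :: t) = none :=
          (pvFailA_none_iff _ _ _).mpr hA.2.2.1
        rw [hver]
        exact pvGood_unique hA' hB
      · -- min(a) < 0 (min(a) = 0 is excluded): every residue ≤ 0 ≤ k, both return min(a) at once
        have hm0 : m ≠ 0 := by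
          intro h
          obtain ⟨x, hx, hxneg⟩ := hzero (by rw [h] at hma; exact hma)
          have := hmin x hx; omega
        have hmneg : m < 0 := by omega
        have hall : ∀ x, PySem.Int.mod x m ≤ k := by
          intro x
          have := PySem.Int.mod_neg_bounds x hmneg
          omega
        have hfa : pvFailA k m (m :: t) = none :=
          (pvFailA_none_iff _ _ _).mpr (fun x _ => hall x)
        have hfil : a.filter (fun num => decide (k < PySem.Int.mod num m)) = [] := by
          rw [List.filter_eq_nil_iff]
          intro x _
          simp only [decide_eq_true_eq, not_lt]
          exact hall x
        have htn : m.toNat + 2 = (m.toNat + 1) + 1 := rfl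
        rw [htn]
        simp only [pvLoopA, pvLoopB, hfa, hfil, List.map_nil]
        rw [show (PySem.List.min? ([] : List Int) (fun x => x)) = none from
          (PySem.List.min?_eq_none_iff _ _).mpr rfl]
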